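-- pv_equiv track=rewrite | github.com/DaniBoy083/redemonitor | main.py | merge_devices
-- ===== SOURCE A (Python) =====
-- def merge_devices(device_lists):
--     """Combina resultados de multiplas varreduras sem duplicar IPs."""
--     merged = {}
--
--     for device_list in device_lists:
--         for device in device_list:
--             existing = merged.get(device["ip"])
--             if existing is None:
--                 merged[device["ip"]] = device
--                 continue
--
--             # Prefere dado de ARP quando houver, pois contem MAC confiavel.
--             if existing.get("discovery") != "ARP" and device.get("discovery") == "ARP":
--                 merged[device["ip"]] = device
--
--     return [merged[ip] for ip in sorted(merged)]
-- ===== SOURCE B (Python) =====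
-- def merge_devices(device_lists):
--     """Combina resultados de multiplas varreduras sem duplicar IPs."""
--     groups = {}
--     for device_list in device_lists:
--         for device in device_list:
--             groups.setdefault(device["ip"], []).append(device)
--
--     result = []
--     for ip in sorted(groups):
--         group = groups[ip]
--         best = next((d for d in group if d.get("discovery") == "ARP"), group[0])
--         result.append(best)
--     return result
-- ===== Notes on version B (the rewrite author's own statement) =====
-- stated objective: alternative
-- what changed: Instead of incrementally resolving a single winner per IP with an in-place replacement rule, B first groups all devices by IP and then selects each group's first ARP entry (falling back to the group's first device) while emitting in sorted-IP order.
import Mathlib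
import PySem

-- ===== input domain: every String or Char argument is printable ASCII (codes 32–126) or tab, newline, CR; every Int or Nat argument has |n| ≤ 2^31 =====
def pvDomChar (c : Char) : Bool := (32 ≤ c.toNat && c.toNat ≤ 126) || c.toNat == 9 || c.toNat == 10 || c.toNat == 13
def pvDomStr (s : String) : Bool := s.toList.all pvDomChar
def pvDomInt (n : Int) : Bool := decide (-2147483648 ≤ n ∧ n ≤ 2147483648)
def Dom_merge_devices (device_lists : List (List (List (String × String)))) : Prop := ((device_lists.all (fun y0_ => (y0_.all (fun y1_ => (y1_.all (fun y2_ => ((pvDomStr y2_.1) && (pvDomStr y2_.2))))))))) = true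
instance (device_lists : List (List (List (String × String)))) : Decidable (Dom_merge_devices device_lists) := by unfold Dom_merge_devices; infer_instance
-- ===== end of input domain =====

-- B groups all devices by IP and then picks each group's first ARP entry (else its first device),
-- instead of A's incremental winner-replacement dict; same values, same cost class.

-- shared helpers (faithful on Pre_: every device carries the "ip" key)
def pvIpOf (d : List (String × String)) : String := (PySem.Dict.mk d).getD "ip" ""
def pvIsArp (d : List (String × String)) : Bool := (PySem.Dict.mk d).get? "discovery" == some "ARP"

-- ===== PORT A =====
def pvMergeStep (merged : PySem.Dict String (List (String × String))) (device : List (String × String)) : PySem.Dict String (List (String × String)) :=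
  match merged.get? (pvIpOf device) with
  | none => merged.insert (pvIpOf device) device
  | some existing =>
    if !(pvIsArp existing) && pvIsArp device then merged.insert (pvIpOf device) device
    else merged

def merge_devices (device_lists : List (List (List (String × String)))) : List (List (String × String)) :=
  let merged := device_lists.foldl (fun m device_list => device_list.foldl pvMergeStep m) PySem.Dict.empty
  (PySem.List.sorted merged.keys (fun x => x) false).map (fun ip => merged.getD ip [])

-- ===== PORT B =====
def pvBestOf (group : List (List (String × String))) : List (String × String) :=
  match group.find? pvIsArp with
  | some d => d
  | none => group.headD []

def merge_devices_alt (device_lists : List (List (List (String × String)))) : List (List (String × String)) :=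
  let groups := device_lists.foldl
    (fun g device_list => device_list.foldl (fun g device => g.modify (pvIpOf device) [] (· ++ [device])) g)
    PySem.Dict.empty
  (PySem.List.sorted groups.keys (fun x => x) false).map (fun ip => pvBestOf (groups.getD ip []))

-- ===== PRECONDITION & SPEC =====
-- Pre_ excludes exactly the inputs on which the Python raises KeyError: a device without the "ip" key.
def Pre_merge_devices (device_lists : List (List (List (String × String)))) : Prop :=
  ∀ dl ∈ device_lists, ∀ d ∈ dl, "ip" ∈ d.map Prod.fst
instance (device_lists : List (List (List (String × String)))) : Decidable (Pre_merge_devices device_lists) := by unfold Pre_merge_devices; infer_instance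

def pvWitness_merge_devices : (List (List (List (String × String)))) :=
  [[[("ip", "10.0.0.2"), ("discovery", "PING")]], [[("ip", "10.0.0.1")], [("ip", "10.0.0.2"), ("discovery", "ARP")]]]

def Spec_merge_devices (device_lists : List (List (List (String × String)))) (out : List (List (String × String))) : Prop := out = merge_devices_alt device_lists
instance (device_lists : List (List (List (String × String)))) (out : List (List (String × String))) : Decidable (Spec_merge_devices device_lists out) := by unfold Spec_merge_devices; infer_instance

-- ===== CLAIM (what is proved, stated in full; the proofs are below) =====
def Claim_equal_merge_devices : Prop := ∀ (device_lists : List (List (List (String × String)))), Dom_merge_devices device_lists → Pre_merge_devices device_lists → Spec_merge_devices device_lists (merge_devices device_lists)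

-- ===== LEMMAS AND PROOFS =====

-- A's per-IP resolution, abstracted: the running value at a key, fed the devices with that key in order.
def pvResolve (o : Option (List (String × String))) (g : List (List (String × String))) : Option (List (String × String)) :=
  match g with
  | [] => o
  | d :: g' =>
    match o with
    | none => pvResolve (some d) g'
    | some e => pvResolve (some (if !(pvIsArp e) && pvIsArp d then d else e)) g'

theorem pvResolve_some (g : List (List (String × String))) (e : List (String × String)) :
    pvResolve (some e) g = some (if pvIsArp e then e else (g.find? pvIsArp).getD e) := by
  induction g generalizing e with
  | nil => simp [pvResolve]
  | cons x g ih =>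
    simp only [pvResolve, ih]
    by_cases he : pvIsArp e = true <;> by_cases hx : pvIsArp x = true <;>
      simp [he, hx]

theorem pvA_get? (l : List (List (String × String))) (d : PySem.Dict String (List (String × String))) (ip : String) :
    (l.foldl pvMergeStep d).get? ip = pvResolve (d.get? ip) (l.filter (fun x => pvIpOf x == ip)) := by
  induction l generalizing d with
  | nil => simp [pvResolve]
  | cons x l ih =>
    simp only [List.foldl_cons, List.filter_cons, ih]
    by_cases hx : pvIpOf x = ip
    · subst hx
      have hstep : (pvMergeStep d x).get? (pvIpOf x)
          = some (match d.get? (pvIpOf x) with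
                  | none => x
                  | some e => if !(pvIsArp e) && pvIsArp x then x else e) := by
        unfold pvMergeStep
        cases hdx : d.get? (pvIpOf x) with
        | none => simp [PySem.Dict.get?_insert_self]
        | some e =>
          by_cases hc : (!(pvIsArp e) && pvIsArp x) = true
          · simp [hc, PySem.Dict.get?_insert_self]
          · simp [hc, hdx]
      rw [hstep]
      cases hdx2 : d.get? (pvIpOf x) <;> simp [pvResolve]
    · have hne : (pvIpOf x == ip) = false := by simp [hx]
      simp only [hne, Bool.false_eq_true, if_false]
      have hstep : (pvMergeStep d x).get? ip = d.get? ip := by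
        unfold pvMergeStep
        cases hdx : d.get? (pvIpOf x) with
        | none => exact PySem.Dict.get?_insert_of_ne d x (fun h => hx h.symm)
        | some e =>
          by_cases hc : (!(pvIsArp e) && pvIsArp x) = true
          · simp only [hc, if_true]
            exact PySem.Dict.get?_insert_of_ne d x (fun h => hx h.symm)
          · simp [hc]
      rw [hstep]

theorem pvA_keys_step (d : PySem.Dict String (List (String × String))) (x : List (String × String)) :
    (pvMergeStep d x).keys = PySem.Set.add d.keys (pvIpOf x) := by
  unfold pvMergeStep
  cases hdx : d.get? (pvIpOf x) with
  | none =>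
    have hc : d.contains (pvIpOf x) = false := (PySem.Dict.get?_eq_none_iff_contains d _).mp hdx
    have hm : pvIpOf x ∉ d.keys := by
      intro hmem
      exact absurd ((PySem.Dict.contains_iff_mem_keys d _).mpr hmem) (by simp [hc])
    rw [PySem.Dict.keys_insert_of_not_contains d x hc]
    simp [PySem.Set.add, hm]
  | some e =>
    have hc : d.contains (pvIpOf x) = true := by
      have := (PySem.Dict.get?_eq_none_iff_contains d (pvIpOf x))
      cases h2 : d.contains (pvIpOf x)
      · rw [this.mpr h2] at hdx; cases hdx
      · rfl
    have hm : pvIpOf x ∈ d.keys := (PySem.Dict.contains_iff_mem_keys d _).mp hc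
    by_cases hcond : (!(pvIsArp e) && pvIsArp x) = true
    · simp only [hcond, if_true]
      rw [PySem.Dict.keys_insert_of_contains d x hc]
      simp [PySem.Set.add, hm]
    · simp only [hcond, Bool.false_eq_true, if_false]
      simp [PySem.Set.add, hm]

theorem pvA_keys (l : List (List (String × String))) (d : PySem.Dict String (List (String × String))) :
    (l.foldl pvMergeStep d).keys = PySem.Set.update d.keys (l.map pvIpOf) := by
  rw [PySem.Set.update_map_eq_foldl_add]
  induction l generalizing d with
  | nil => simp
  | cons x l ih => simp only [List.foldl_cons, ih, pvA_keys_step]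

-- B's groups dict, via the library grouping lemmas
theorem pvB_getD (l : List (List (String × String))) (ip : String) :
    (l.foldl (fun g device => g.modify (pvIpOf device) [] (· ++ [device])) PySem.Dict.empty).getD ip []
      = l.filter (fun x => pvIpOf x == ip) := by
  have h : l.foldl (fun g device => g.modify (pvIpOf device) [] (· ++ [device])) PySem.Dict.empty
      = (l.map (fun d => (pvIpOf d, d))).foldl (fun g p => g.modify p.1 [] (· ++ [p.2])) PySem.Dict.empty := by
    rw [List.foldl_map]
  rw [h, PySem.Dict.getD_foldl_modify_append]
  simp [List.filter_map, Function.comp_def]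

theorem pvB_keys (l : List (List (String × String))) :
    (l.foldl (fun g device => g.modify (pvIpOf device) [] (· ++ [device])) PySem.Dict.empty).keys
      = PySem.Set.ofList (l.map pvIpOf) := by
  rw [PySem.Dict.keys_foldl_modify_key l pvIpOf [] (fun d x v => v ++ [x]) PySem.Dict.empty,
    PySem.Dict.keys_empty, PySem.Set.update_nil_left]

-- winner of a nonempty group: A's resolve from scratch = B's first-ARP-else-head selection
theorem pvResolve_bestOf (g : List (List (String × String))) (hg : g ≠ []) :
    pvResolve none g = some (pvBestOf g) := by
  cases g with
  | nil => exact absurd rfl hg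
  | cons h t =>
    simp only [pvResolve, pvResolve_some, pvBestOf, List.find?_cons]
    by_cases hh : pvIsArp h = true
    · simp [hh]
    · have hh' : pvIsArp h = false := by simpa using hh
      cases t.find? pvIsArp <;> simp [hh']

theorem pv_nested_foldl {α β : Type} (device_lists : List (List β))
    (f : α → β → α)
    (init : α) :
    device_lists.foldl (fun m dl => dl.foldl f m) init = device_lists.flatten.foldl f init := by
  induction device_lists generalizing init with
  | nil => rfl
  | cons x l ih => simp [List.foldl_cons, List.flatten_cons, List.foldl_append, ih]

-- ===== VERDICT (by name: the statement is the Claim_ definition above) =====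
theorem merge_devices_spec : Claim_equal_merge_devices := by
  intro device_lists _ _
  show merge_devices device_lists = merge_devices_alt device_lists
  simp only [merge_devices, merge_devices_alt]
  rw [pv_nested_foldl device_lists pvMergeStep PySem.Dict.empty,
    pv_nested_foldl device_lists (fun g device => g.modify (pvIpOf device) ([] : List (List (String × String))) (fun v => v ++ [device])) PySem.Dict.empty]
  set flat := device_lists.flatten with hflat
  have hkA := pvA_keys flat PySem.Dict.empty
  rw [PySem.Dict.keys_empty, PySem.Set.update_nil_left] at hkA
  have hkB := pvB_keys flat
  rw [hkA, hkB]
  apply List.map_congr_left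
  intro ip hip
  have hip' : ip ∈ PySem.Set.ofList (flat.map pvIpOf) := by
    rw [PySem.List.mem_sorted] at hip; exact hip
  have hmem : ∃ x ∈ flat, pvIpOf x = ip := by
    rw [PySem.Set.mem_ofList] at hip'
    simpa using hip'
  have hne : flat.filter (fun x => pvIpOf x == ip) ≠ [] := by
    obtain ⟨x, hx, hxe⟩ := hmem
    intro hnil
    have : x ∈ flat.filter (fun x => pvIpOf x == ip) := by
      rw [List.mem_filter]; exact ⟨hx, by simp [hxe]⟩
    simp [hnil] at this
  have hA : (flat.foldl pvMergeStep PySem.Dict.empty).getD ip []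
      = pvBestOf (flat.filter (fun x => pvIpOf x == ip)) := by
    have hget := pvA_get? flat PySem.Dict.empty ip
    rw [PySem.Dict.get?_empty] at hget
    rw [pvResolve_bestOf _ hne] at hget
    exact PySem.Dict.getD_of_get?_eq_some _ [] hget
  rw [hA, pvB_getD]
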